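-- pv_equiv track=rewrite | github.com/seankklol/bookmark-clicker | bookmark_clicker.py | group_rectangles
-- ===== SOURCE A (Python) =====
-- from typing import Optional, Tuple, List
--
-- def group_rectangles(rects: List[Tuple[int, int, int, int]], threshold: int = 10) -> List[Tuple[int, int, int, int]]:
--     """Groups overlapping rectangles to avoid multiple clicks on the same item."""
--     if not rects:
--         return []
--
--     # Sort rectangles by their x-coordinate
--     rects.sort(key=lambda r: r[0])
--
--     grouped = []
--     current_group = list(rects[0])
--
--     for i in range(1, len(rects)):
--         rect = rects[i]
--         # Check for overlap or proximity
--         if rect[0] < current_group[0] + current_group[2] + threshold: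
--             # Merge rectangles
--             new_x2 = max(current_group[0] + current_group[2], rect[0] + rect[2])
--             new_y2 = max(current_group[1] + current_group[3], rect[1] + rect[3])
--             current_group[0] = min(current_group[0], rect[0])
--             current_group[1] = min(current_group[1], rect[1])
--             current_group[2] = new_x2 - current_group[0]
--             current_group[3] = new_y2 - current_group[1]
--         else:
--             grouped.append(tuple(current_group))
--             current_group = list(rect)
--
--     grouped.append(tuple(current_group))
--     return grouped
-- ===== SOURCE B (Python) =====
-- from typing import Tuple, List
--
-- def group_rectangles(rects: List[Tuple[int, int, int, int]], threshold: int = 10) -> List[Tuple[int, int, int, int]]: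
--     """Groups overlapping rectangles to avoid multiple clicks on the same item.
--
--     Two passes: first partition the sorted rects into groups by the running
--     max right edge, then reduce each group to its bounding box.
--     Sorts `rects` in place, like the original.
--     """
--     if not rects:
--         return []
--     rects.sort(key=lambda r: r[0])
--     groups = []
--     current = [rects[0]]
--     running_right = rects[0][0] + rects[0][2]
--     for rect in rects[1:]:
--         if rect[0] < running_right + threshold:
--             current.append(rect)
--             running_right = max(running_right, rect[0] + rect[2])
--         else:
--             groups.append(current)
--             current = [rect]
--             running_right = rect[0] + rect[2]
--     groups.append(current)
--     result = []
--     for g in groups: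
--         x = min(r[0] for r in g)
--         y = min(r[1] for r in g)
--         x2 = max(r[0] + r[2] for r in g)
--         y2 = max(r[1] + r[3] for r in g)
--         result.append((x, y, x2 - x, y2 - y))
--     return result
-- ===== Notes on version B (the rewrite author's own statement) =====
-- stated objective: alternative
-- what changed: Replaces A's single loop that incrementally mutates a running bounding box with a two-pass decomposition: a first pass partitions the sorted rects into groups using only the running max right edge, and a second pass reduces each group to its bounding box.
import Mathlib
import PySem

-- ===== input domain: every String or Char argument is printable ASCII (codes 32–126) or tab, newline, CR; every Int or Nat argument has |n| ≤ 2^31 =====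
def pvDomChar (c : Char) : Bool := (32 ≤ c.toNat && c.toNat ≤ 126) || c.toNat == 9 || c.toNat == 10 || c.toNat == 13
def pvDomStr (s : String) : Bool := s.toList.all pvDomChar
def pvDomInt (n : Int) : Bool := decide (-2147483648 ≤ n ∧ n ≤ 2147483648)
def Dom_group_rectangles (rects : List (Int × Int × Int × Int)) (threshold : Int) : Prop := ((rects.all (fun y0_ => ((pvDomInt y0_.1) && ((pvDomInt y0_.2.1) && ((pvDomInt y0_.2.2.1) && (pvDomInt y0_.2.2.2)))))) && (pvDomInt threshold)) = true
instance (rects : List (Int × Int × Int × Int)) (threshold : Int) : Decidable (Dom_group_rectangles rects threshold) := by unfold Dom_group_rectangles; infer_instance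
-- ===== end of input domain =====

-- B replaces A's incremental bounding-box mutation with a two-pass decomposition
-- (partition by running max right edge, then reduce each group to its bounding box);
-- both sort the argument list in place in Python — only the return value is proved equal here.


-- ===== PORT A =====
-- A's loop over rects[1:]: state = the current merged bounding box (x, y, w, h)
def grLoopA (rest : List (Int × Int × Int × Int)) (cur : Int × Int × Int × Int)
    (threshold : Int) (acc : List (Int × Int × Int × Int)) : List (Int × Int × Int × Int) :=
  match rest with
  | [] => acc ++ [cur]
  | r :: rs =>
    if r.1 < cur.1 + cur.2.2.1 + threshold then
      let newX2 := max (cur.1 + cur.2.2.1) (r.1 + r.2.2.1)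
      let newY2 := max (cur.2.1 + cur.2.2.2) (r.2.1 + r.2.2.2)
      let nx := min cur.1 r.1
      let ny := min cur.2.1 r.2.1
      grLoopA rs (nx, ny, newX2 - nx, newY2 - ny) threshold acc
    else
      grLoopA rs r threshold (acc ++ [cur])

def group_rectangles (rects : List (Int × Int × Int × Int)) (threshold : Int) : List (Int × Int × Int × Int) :=
  match PySem.List.sorted rects (fun r => r.1) false with
  | [] => []
  | r :: rs => grLoopA rs r threshold []

-- ===== PORT B =====
-- first pass: partition into groups by the running max right edge
def grPart (rest : List (Int × Int × Int × Int)) (current : List (Int × Int × Int × Int))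
    (runningRight : Int) (threshold : Int) (groups : List (List (Int × Int × Int × Int))) :
    List (List (Int × Int × Int × Int)) :=
  match rest with
  | [] => groups ++ [current]
  | r :: rs =>
    if r.1 < runningRight + threshold then
      grPart rs (current ++ [r]) (max runningRight (r.1 + r.2.2.1)) threshold groups
    else
      grPart rs [r] (r.1 + r.2.2.1) threshold (groups ++ [current])

-- second pass: reduce one group to its bounding box (groups are always nonempty)
def grBBox (g : List (Int × Int × Int × Int)) : Int × Int × Int × Int :=
  match g with
  | [] => (0, 0, 0, 0)
  | r :: rs =>
    let x := rs.foldl (fun m p => min m p.1) r.1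
    let y := rs.foldl (fun m p => min m p.2.1) r.2.1
    let x2 := rs.foldl (fun m p => max m (p.1 + p.2.2.1)) (r.1 + r.2.2.1)
    let y2 := rs.foldl (fun m p => max m (p.2.1 + p.2.2.2)) (r.2.1 + r.2.2.2)
    (x, y, x2 - x, y2 - y)

def group_rectangles_alt (rects : List (Int × Int × Int × Int)) (threshold : Int) : List (Int × Int × Int × Int) :=
  match PySem.List.sorted rects (fun r => r.1) false with
  | [] => []
  | r :: rs => (grPart rs [r] (r.1 + r.2.2.1) threshold []).map grBBox

-- ===== PRECONDITION & SPEC =====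
def Spec_group_rectangles (rects : List (Int × Int × Int × Int)) (threshold : Int) (out : List (Int × Int × Int × Int)) : Prop := out = group_rectangles_alt rects threshold
instance (rects : List (Int × Int × Int × Int)) (threshold : Int) (out : List (Int × Int × Int × Int)) : Decidable (Spec_group_rectangles rects threshold out) := by unfold Spec_group_rectangles; infer_instance

-- ===== CLAIM (what is proved, stated in full; the proofs are below) =====
def Claim_equal_group_rectangles : Prop := ∀ (rects : List (Int × Int × Int × Int)) (threshold : Int), Dom_group_rectangles rects threshold → Spec_group_rectangles rects threshold (group_rectangles rects threshold)

-- ===== LEMMAS AND PROOFS =====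

-- the max right edge of a nonempty group, as maintained by grPart's runningRight
def grMaxR (r : Int × Int × Int × Int) (rs : List (Int × Int × Int × Int)) : Int :=
  rs.foldl (fun m p => max m (p.1 + p.2.2.1)) (r.1 + r.2.2.1)

lemma grBBox_x_right (r : Int × Int × Int × Int) (rs : List (Int × Int × Int × Int)) :
    (grBBox (r :: rs)).1 + (grBBox (r :: rs)).2.2.1 = grMaxR r rs := by
  simp [grBBox, grMaxR]

lemma grBBox_snoc (r q : Int × Int × Int × Int) (rs : List (Int × Int × Int × Int)) :
    grBBox (r :: (rs ++ [q])) =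
      (min (grBBox (r :: rs)).1 q.1, min (grBBox (r :: rs)).2.1 q.2.1,
       max (grMaxR r rs) (q.1 + q.2.2.1) - min (grBBox (r :: rs)).1 q.1,
       max ((grBBox (r :: rs)).2.1 + (grBBox (r :: rs)).2.2.2) (q.2.1 + q.2.2.2) - min (grBBox (r :: rs)).2.1 q.2.1) := by
  simp [grBBox, grMaxR, List.foldl_append]

lemma grMaxR_snoc (r q : Int × Int × Int × Int) (rs : List (Int × Int × Int × Int)) :
    grMaxR r (rs ++ [q]) = max (grMaxR r rs) (q.1 + q.2.2.1) := by
  simp [grMaxR, List.foldl_append]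

lemma grBBox_singleton (q : Int × Int × Int × Int) : grBBox [q] = q := by
  obtain ⟨a, b, c, d⟩ := q
  simp [grBBox]

-- loop invariant: A's state is the bounding box of B's current group, and the
-- threshold tests agree because x + w of the box is the group's max right edge
lemma grLoop_eq (rest : List (Int × Int × Int × Int)) :
    ∀ (r : Int × Int × Int × Int) (rs : List (Int × Int × Int × Int)) (threshold : Int)
      (acc : List (List (Int × Int × Int × Int))),
    grLoopA rest (grBBox (r :: rs)) threshold (acc.map grBBox) =
      (grPart rest (r :: rs) (grMaxR r rs) threshold acc).map grBBox := by
  induction rest with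
  | nil => intro r rs threshold acc; simp [grLoopA, grPart]
  | cons q qs ih =>
    intro r rs threshold acc
    rw [grLoopA, grPart]
    rw [grBBox_x_right]
    by_cases h : q.1 < grMaxR r rs + threshold
    · simp only [h, if_pos]
      have h1 : grBBox (r :: (rs ++ [q])) =
          (min (grBBox (r :: rs)).1 q.1, min (grBBox (r :: rs)).2.1 q.2.1,
           max (grMaxR r rs) (q.1 + q.2.2.1) - min (grBBox (r :: rs)).1 q.1,
           max ((grBBox (r :: rs)).2.1 + (grBBox (r :: rs)).2.2.2) (q.2.1 + q.2.2.2) - min (grBBox (r :: rs)).2.1 q.2.1) := grBBox_snoc r q rs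
      have h2 := grMaxR_snoc r q rs
      have := ih r (rs ++ [q]) threshold acc
      rw [h1, h2] at this
      exact this
    · simp only [h, if_neg, not_false_iff]
      have := ih q [] threshold (acc ++ [r :: rs])
      simp only [grMaxR, List.foldl_nil, List.map_append, List.map_cons, List.map_nil] at this ⊢
      rw [grBBox_singleton] at this
      exact this

-- ===== VERDICT (by name: the statement is the Claim_ definition above) =====
theorem group_rectangles_spec : Claim_equal_group_rectangles := by
  intro rects threshold _
  unfold Spec_group_rectangles group_rectangles group_rectangles_alt
  cases h : PySem.List.sorted rects (fun r => r.1) false with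
  | nil => rfl
  | cons r rs =>
    have := grLoop_eq rs r [] threshold []
    simpa [grBBox_singleton, grMaxR] using this
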